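-- pv_equiv track=rewrite | github.com/wwwwodddd/Zukunft | leetcode/maximum-number-of-people-that-can-be-caught-in-tag.py | catchMaximumAmountofPeople
-- ===== SOURCE A (Python) =====
-- from typing import List
--
-- def catchMaximumAmountofPeople(a: List[int], d: int) -> int:
--     p = []
--     q = []
--     for i in range(len(a)):
--         if a[i] == 0:
--             p.append(i)
--         else:
--             q.append(i)
--     i = 0
--     j = 0
--     z = 0
--     while i < len(p) and j < len(q):
--         if abs(p[i] - q[j]) <= d:
--             i += 1
--             j += 1
--             z += 1
--         elif p[i] < q[j]:
--             i += 1
--         else: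
--             j += 1
--     return z
-- ===== SOURCE B (Python) =====
-- from typing import List
-- from collections import deque
--
-- def catchMaximumAmountofPeople(a: List[int], d: int) -> int:
--     taggers = deque()  # unmatched tagger indices seen so far
--     people = deque()   # unmatched people indices seen so far
--     z = 0
--     for i, x in enumerate(a):
--         own, other = (taggers, people) if x == 0 else (people, taggers)
--         while other and i - other[0] > d:
--             other.popleft()
--         if other:
--             other.popleft()
--             z += 1
--         else:
--             own.append(i)
--     return z
-- ===== Notes on version B (the rewrite author's own statement) =====
-- stated objective: alternative
-- what changed: Replaced A's build-two-index-lists-then-two-pointer-merge with a single left-to-right sweep that keeps two deques of unmatched tagger/people indices, evicting fronts outside the distance window and matching greedily in place.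
import Mathlib
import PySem

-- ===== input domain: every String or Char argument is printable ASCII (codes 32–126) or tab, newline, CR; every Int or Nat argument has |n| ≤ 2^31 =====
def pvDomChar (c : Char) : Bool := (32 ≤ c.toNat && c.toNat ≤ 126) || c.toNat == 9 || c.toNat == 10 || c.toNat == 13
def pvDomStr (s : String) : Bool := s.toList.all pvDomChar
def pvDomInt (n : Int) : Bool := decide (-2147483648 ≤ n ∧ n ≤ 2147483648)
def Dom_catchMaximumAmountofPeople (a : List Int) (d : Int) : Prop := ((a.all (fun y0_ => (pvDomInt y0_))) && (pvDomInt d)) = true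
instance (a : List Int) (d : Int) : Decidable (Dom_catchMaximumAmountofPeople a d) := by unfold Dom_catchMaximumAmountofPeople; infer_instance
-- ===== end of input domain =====

-- B replaces A's two-pointer merge over pre-built index lists by a single windowed
-- deque sweep (objective: alternative, same cost, different data flow).

-- ===== PORT A =====
-- the while loop over indices i, j with counter z, as structural recursion on the suffixes
def pvMergeA (p q : List Int) (d : Int) : Int :=
  match p, q with
  | x :: p', y :: q' =>
    if |x - y| ≤ d then 1 + pvMergeA p' q' d
    else if x < y then pvMergeA p' (y :: q') d
    else pvMergeA (x :: p') q' d
  | _, _ => 0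
termination_by p.length + q.length

def catchMaximumAmountofPeople (a : List Int) (d : Int) : Int :=
  -- for i in range(len(a)): append i to p (a[i]==0) or q
  let pq := (PySem.List.pyRange 0 (PySem.List.len a) 1).foldl
    (fun (pq : List Int × List Int) i =>
      if PySem.List.pyGetD a i 0 = 0 then (pq.1 ++ [i], pq.2) else (pq.1, pq.2 ++ [i]))
    ([], [])
  pvMergeA pq.1 pq.2 d

-- ===== PORT B =====
-- while other and i - other[0] > d: other.popleft()
def pvEvict (q : List Int) (i d : Int) : List Int :=
  match q with
  | [] => []
  | f :: r => if i - f > d then pvEvict r i d else f :: r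

-- the enumerate loop: taggers/people are the two deques (head = front), z the match count
def pvSweep (xs : List Int) (i : Int) (tg pp : List Int) (z : Int) (d : Int) : Int :=
  match xs with
  | [] => z
  | x :: rest =>
    if x = 0 then
      match pvEvict pp i d with
      | [] => pvSweep rest (i + 1) (tg ++ [i]) [] z d
      | _ :: pp' => pvSweep rest (i + 1) tg pp' (z + 1) d
    else
      match pvEvict tg i d with
      | [] => pvSweep rest (i + 1) [] (pp ++ [i]) z d
      | _ :: tg' => pvSweep rest (i + 1) tg' pp (z + 1) d

def catchMaximumAmountofPeople_alt (a : List Int) (d : Int) : Int :=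
  pvSweep a 0 [] [] 0 d

-- ===== PRECONDITION & SPEC =====
def Spec_catchMaximumAmountofPeople (a : List Int) (d : Int) (out : Int) : Prop := out = catchMaximumAmountofPeople_alt a d
instance (a : List Int) (d : Int) (out : Int) : Decidable (Spec_catchMaximumAmountofPeople a d out) := by unfold Spec_catchMaximumAmountofPeople; infer_instance

-- ===== CLAIM (what is proved, stated in full; the proofs are below) =====
def Claim_equal_catchMaximumAmountofPeople : Prop := ∀ (a : List Int) (d : Int), Dom_catchMaximumAmountofPeople a d → Spec_catchMaximumAmountofPeople a d (catchMaximumAmountofPeople a d)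

-- ===== LEMMAS AND PROOFS =====

-- tagger / people index lists of xs, indexed from i (structural versions of A's first loop)
def pvTg : List Int → Int → List Int
  | [], _ => []
  | x :: xs, i => if x = 0 then i :: pvTg xs (i + 1) else pvTg xs (i + 1)

def pvPp : List Int → Int → List Int
  | [], _ => []
  | x :: xs, i => if x = 0 then pvPp xs (i + 1) else i :: pvPp xs (i + 1)

lemma pvBuild_eq (a : List Int) : ∀ (i : Int) (p q : List Int),
    (PySem.List.enumerate a i).foldl
      (fun (pq : List Int × List Int) ix =>
        if ix.2 = 0 then (pq.1 ++ [ix.1], pq.2) else (pq.1, pq.2 ++ [ix.1]))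
      (p, q) = (p ++ pvTg a i, q ++ pvPp a i) := by
  induction a with
  | nil => intro i p q; simp [PySem.List.enumerate_nil, pvTg, pvPp]
  | cons x xs ih =>
    intro i p q
    rw [PySem.List.enumerate_cons]
    simp only [List.foldl_cons]
    by_cases hx : x = 0 <;> simp only [hx, ite_true, ite_false, pvTg, pvPp] <;>
      rw [ih] <;> simp [List.append_assoc]

lemma pvMergeA_nil_right (p : List Int) (d : Int) : pvMergeA p [] d = 0 := by
  cases p <;> simp [pvMergeA]

lemma pvEvict_mem {M : List Int} {i d m : Int} (h : m ∈ pvEvict M i d) : m ∈ M := by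
  induction M with
  | nil => simp [pvEvict] at h
  | cons f r ih =>
    rw [pvEvict] at h
    split at h
    · exact List.mem_cons_of_mem _ (ih h)
    · exact h

lemma pvEvict_head {M : List Int} {i d m : Int} {M' : List Int}
    (h : pvEvict M i d = m :: M') : i - m ≤ d := by
  induction M with
  | nil => simp [pvEvict] at h
  | cons f r ih =>
    rw [pvEvict] at h
    split at h
    · exact ih h
    · cases h; omega

-- eviction of stale people fronts is exactly A's "j += 1" skipping
lemma pvMerge_evict_q (d : Int) (M : List Int) : ∀ (i : Int) (tgl ppl : List Int),
    (∀ m ∈ M, m < i) →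
    pvMergeA (i :: tgl) (M ++ ppl) d = pvMergeA (i :: tgl) (pvEvict M i d ++ ppl) d := by
  induction M with
  | nil => intro i tgl ppl _; rfl
  | cons m r ih =>
    intro i tgl ppl h
    have hm : m < i := h m (by simp)
    rw [pvEvict]
    split
    · rename_i hgt
      have habs : ¬ |i - m| ≤ d := by rw [abs_of_nonneg (by omega)]; omega
      rw [List.cons_append, pvMergeA, if_neg habs, if_neg (by omega)]
      exact ih i tgl ppl (fun x hx => h x (List.mem_cons_of_mem _ hx))
    · rfl

-- eviction of stale tagger fronts is exactly A's "i += 1" skipping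
lemma pvMerge_evict_p (d : Int) (L : List Int) : ∀ (i : Int) (tgl ppl : List Int),
    (∀ l ∈ L, l < i) →
    pvMergeA (L ++ tgl) (i :: ppl) d = pvMergeA (pvEvict L i d ++ tgl) (i :: ppl) d := by
  induction L with
  | nil => intro i tgl ppl _; rfl
  | cons l r ih =>
    intro i tgl ppl h
    have hl : l < i := h l (by simp)
    rw [pvEvict]
    split
    · rename_i hgt
      have habs : ¬ |l - i| ≤ d := by rw [abs_of_nonpos (by omega), neg_sub]; omega
      rw [List.cons_append, pvMergeA, if_neg habs, if_pos (by omega)]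
      exact ih i tgl ppl (fun x hx => h x (List.mem_cons_of_mem _ hx))
    · rfl

-- the sweep with pending deques L (taggers) and M (people) computes z plus the merge
-- of the remaining index lists; invariant: at most one deque is nonempty
lemma pvSweep_eq (d : Int) (xs : List Int) : ∀ (i : Int) (L M : List Int) (z : Int),
    (∀ l ∈ L, l < i) → (∀ m ∈ M, m < i) → (L = [] ∨ M = []) →
    pvSweep xs i L M z d = z + pvMergeA (L ++ pvTg xs i) (M ++ pvPp xs i) d := by
  induction xs with
  | nil =>
    intro i L M z _ _ hor
    rcases hor with h | h <;> subst h <;>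
      simp [pvSweep, pvTg, pvPp, pvMergeA, pvMergeA_nil_right]
  | cons x rest ih =>
    intro i L M z hL hM hor
    by_cases hx : x = 0
    · -- tagger at i
      rw [pvSweep, if_pos hx, pvTg, pvPp, if_pos hx, if_pos hx]
      rcases hor with hLe | hMe
      · subst hLe
        simp only [List.nil_append]
        rw [pvMerge_evict_q d M i _ _ hM]
        cases hE : pvEvict M i d with
        | nil =>
          show pvSweep rest (i + 1) [i] [] z d = _
          rw [ih (i + 1) [i] [] z (by intro l hl; simp at hl; omega)
            (by simp) (Or.inr rfl)]
          simp
        | cons m M'' =>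
          have hmlt : m < i := hM m (pvEvict_mem (by rw [hE]; simp))
          have hle : i - m ≤ d := pvEvict_head hE
          rw [List.cons_append, pvMergeA,
            if_pos (by rw [abs_of_nonneg (by omega)]; omega)]
          show pvSweep rest (i + 1) [] M'' (z + 1) d = _
          rw [ih (i + 1) [] M'' (z + 1) (by simp)
            (by intro m' hm'; have := hM m' (pvEvict_mem (by rw [hE]; exact List.mem_cons_of_mem _ hm')); omega)
            (Or.inl rfl)]
          simp
          ring
      · subst hMe
        rw [show pvEvict ([] : List Int) i d = [] from rfl]
        rw [ih (i + 1) (L ++ [i]) [] z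
          (by intro l hl; rcases List.mem_append.mp hl with h | h
              · have := hL l h; omega
              · simp at h; omega)
          (by simp) (Or.inr rfl)]
        simp [List.append_assoc]
    · -- person at i
      rw [pvSweep, if_neg hx, pvTg, pvPp, if_neg hx, if_neg hx]
      rcases hor with hLe | hMe
      · subst hLe
        rw [show pvEvict ([] : List Int) i d = [] from rfl]
        rw [ih (i + 1) [] (M ++ [i]) z (by simp)
          (by intro m hm; rcases List.mem_append.mp hm with h | h
              · have := hM m h; omega
              · simp at h; omega)
          (Or.inl rfl)]
        simp [List.append_assoc]
      · subst hMe
        simp only [List.nil_append]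
        rw [pvMerge_evict_p d L i _ _ hL]
        cases hE : pvEvict L i d with
        | nil =>
          show pvSweep rest (i + 1) [] [i] z d = _
          rw [ih (i + 1) [] [i] z (by simp)
            (by intro m hm; simp at hm; omega) (Or.inl rfl)]
          simp
        | cons l L'' =>
          have hllt : l < i := hL l (pvEvict_mem (by rw [hE]; simp))
          have hle : i - l ≤ d := pvEvict_head hE
          rw [List.cons_append, pvMergeA,
            if_pos (by rw [abs_of_nonpos (by omega), neg_sub]; omega)]
          show pvSweep rest (i + 1) L'' [] (z + 1) d = _
          rw [ih (i + 1) L'' [] (z + 1)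
            (by intro l' hl'; have := hL l' (pvEvict_mem (by rw [hE]; exact List.mem_cons_of_mem _ hl')); omega)
            (by simp) (Or.inr rfl)]
          simp
          ring

lemma pvA_eq (a : List Int) (d : Int) :
    catchMaximumAmountofPeople a d = pvMergeA (pvTg a 0) (pvPp a 0) d := by
  unfold catchMaximumAmountofPeople
  have h1 : (PySem.List.pyRange 0 (PySem.List.len a) 1).foldl
      (fun (pq : List Int × List Int) i =>
        if PySem.List.pyGetD a i 0 = 0 then (pq.1 ++ [i], pq.2) else (pq.1, pq.2 ++ [i]))
      ([], []) = (pvTg a 0, pvPp a 0) := by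
    have h2 := PySem.List.enumerate_eq_map_pyRange (xs := a) (d := (0 : Int))
    calc (PySem.List.pyRange 0 (PySem.List.len a) 1).foldl
          (fun (pq : List Int × List Int) i =>
            if PySem.List.pyGetD a i 0 = 0 then (pq.1 ++ [i], pq.2) else (pq.1, pq.2 ++ [i]))
          ([], [])
        = ((PySem.List.pyRange 0 (PySem.List.len a) 1).map
            (fun j => (j, PySem.List.pyGetD a j 0))).foldl
          (fun (pq : List Int × List Int) ix =>
            if ix.2 = 0 then (pq.1 ++ [ix.1], pq.2) else (pq.1, pq.2 ++ [ix.1]))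
          ([], []) := by rw [List.foldl_map]
      _ = (PySem.List.enumerate a 0).foldl
          (fun (pq : List Int × List Int) ix =>
            if ix.2 = 0 then (pq.1 ++ [ix.1], pq.2) else (pq.1, pq.2 ++ [ix.1]))
          ([], []) := by rw [h2]
      _ = (pvTg a 0, pvPp a 0) := by rw [pvBuild_eq a 0 [] []]; simp
  simp only [h1]

-- ===== VERDICT (by name: the statement is the Claim_ definition above) =====
theorem catchMaximumAmountofPeople_spec : Claim_equal_catchMaximumAmountofPeople := by
  intro a d _
  unfold Spec_catchMaximumAmountofPeople catchMaximumAmountofPeople_alt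
  rw [pvA_eq, pvSweep_eq d a 0 [] [] 0 (by simp) (by simp) (Or.inl rfl)]
  simp
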